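-- pv_equiv track=rewrite | github.com/noxe19/labs | lab7.py | suitable_number
-- ===== SOURCE A (Python) =====
-- def suitable_number(i):
--     k = 0
--     summ = 0
--     for j in str(i):
--         if j in sbl:
--             summ += int(j)
--             k += 1
--     return k, summ
--
-- sbl = ['0', '2', '4', '6', '8']
-- ===== SOURCE B (Python) =====
-- def suitable_number(i):
--     # Tabulate character frequencies of str(i) once, then aggregate over the
--     # five even-digit classes -- instead of branching per character.
--     freq = {}
--     for ch in str(i):
--         freq[ch] = freq.get(ch, 0) + 1
--     k = 0
--     summ = 0
--     for d in '02468':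
--         c = freq.get(d, 0)
--         k += c
--         summ += int(d) * c
--     return k, summ
-- ===== Notes on version B (the rewrite author's own statement) =====
-- stated objective: alternative
-- what changed: B builds a frequency table of the characters of str(i) in one pass and then aggregates count and sum over the five even-digit classes, instead of A's per-character membership branch accumulating both totals.
import Mathlib
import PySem

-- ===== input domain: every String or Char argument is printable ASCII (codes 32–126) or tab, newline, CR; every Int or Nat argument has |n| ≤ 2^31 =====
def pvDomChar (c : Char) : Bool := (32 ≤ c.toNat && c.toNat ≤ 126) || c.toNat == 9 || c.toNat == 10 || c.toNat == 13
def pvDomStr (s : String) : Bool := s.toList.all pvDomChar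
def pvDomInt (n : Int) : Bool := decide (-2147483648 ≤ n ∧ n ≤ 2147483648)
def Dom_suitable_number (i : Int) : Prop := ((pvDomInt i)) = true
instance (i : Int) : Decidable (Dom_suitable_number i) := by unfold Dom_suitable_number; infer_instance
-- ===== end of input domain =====

-- B builds a character-frequency table of str(i) once, then aggregates over the five
-- even-digit classes, instead of A's per-character membership branch (alternative, same cost).

-- ===== PORT A =====
-- sbl = ['0', '2', '4', '6', '8']
def pvSbl : List Char := ['0', '2', '4', '6', '8']

def suitable_number (i : Int) : Int × Int :=
  -- k = 0; summ = 0; for j in str(i): if j in sbl: summ += int(j); k += 1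
  (PySem.Int.toStr i).toList.foldl
    (fun (acc : Int × Int) j =>
      if j ∈ pvSbl then
        -- int(j): j is a digit in sbl so the parse always succeeds; getD 0 is unreachable
        (acc.1 + 1, acc.2 + (PySem.Int.ofStr? (String.mk [j])).getD 0)
      else acc)
    (0, 0)

-- ===== PORT B =====
def suitable_number_alt (i : Int) : Int × Int :=
  -- freq = {}; for ch in str(i): freq[ch] = freq.get(ch, 0) + 1
  let freq : PySem.Dict Char Int :=
    (PySem.Int.toStr i).toList.foldl
      (fun d ch => d.insert ch (d.getD ch 0 + 1)) PySem.Dict.empty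
  -- k = 0; summ = 0; for d in '02468': c = freq.get(d, 0); k += c; summ += int(d)*c
  ("02468".toList).foldl
    (fun (acc : Int × Int) d =>
      let c := freq.getD d 0
      (acc.1 + c, acc.2 + (PySem.Int.ofStr? (String.mk [d])).getD 0 * c))
    (0, 0)

-- ===== PRECONDITION & SPEC =====
def Spec_suitable_number (i : Int) (out : Int × Int) : Prop := out = suitable_number_alt i
instance (i : Int) (out : Int × Int) : Decidable (Spec_suitable_number i out) := by unfold Spec_suitable_number; infer_instance

-- ===== CLAIM (what is proved, stated in full; the proofs are below) =====
def Claim_equal_suitable_number : Prop := ∀ (i : Int), Dom_suitable_number i → Spec_suitable_number i (suitable_number i)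

-- ===== LEMMAS AND PROOFS =====

-- A's loop, from any accumulator, adds the per-even-digit counts and the weighted sum.
theorem pvFoldA (l : List Char) (k s : Int) :
    l.foldl
      (fun (acc : Int × Int) j =>
        if j ∈ pvSbl then
          (acc.1 + 1, acc.2 + (PySem.Int.ofStr? (String.mk [j])).getD 0)
        else acc)
      (k, s)
    = (k + ((l.count '0' + l.count '2' + l.count '4' + l.count '6' + l.count '8' : Nat) : Int),
       s + ((2 * l.count '2' + 4 * l.count '4' + 6 * l.count '6' + 8 * l.count '8' : Nat) : Int)) := by
  have h0 : (PySem.Int.ofStr? (String.mk ['0'])).getD 0 = 0 := by decide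
  have h2 : (PySem.Int.ofStr? (String.mk ['2'])).getD 0 = 2 := by decide
  have h4 : (PySem.Int.ofStr? (String.mk ['4'])).getD 0 = 4 := by decide
  have h6 : (PySem.Int.ofStr? (String.mk ['6'])).getD 0 = 6 := by decide
  have h8 : (PySem.Int.ofStr? (String.mk ['8'])).getD 0 = 8 := by decide
  induction l generalizing k s with
  | nil => simp
  | cons c t ih =>
      simp only [List.foldl_cons]
      by_cases h : c ∈ pvSbl
      · simp only [h, if_pos]
        rw [ih]
        simp only [pvSbl, List.mem_cons, List.mem_singleton, List.not_mem_nil, or_false] at h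
        rcases h with h | h | h | h | h <;> subst h <;>
          simp [List.count_cons, h0, h2, h4, h6, h8] <;> first | exact ⟨trivial, trivial⟩ | omega
      · simp only [h, if_neg, not_false_iff]
        rw [ih]
        simp only [pvSbl, List.mem_cons, List.mem_singleton, List.not_mem_nil, or_false,
          not_or] at h
        obtain ⟨h0, h2, h4, h6, h8⟩ := h
        simp [List.count_cons, h0, h2, h4, h6, h8]

-- B's aggregation pass, written out over the five digit classes.
theorem pvAltEval (i : Int) :
    suitable_number_alt i
    = (let l := (PySem.Int.toStr i).toList
       (((l.count '0' : Nat) : Int) + l.count '2' + l.count '4' + l.count '6' + l.count '8',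
        2 * ((l.count '2' : Nat) : Int) + 4 * l.count '4' + 6 * l.count '6' + 8 * l.count '8')) := by
  have h0 : (PySem.Int.ofStr? (String.mk ['0'])).getD 0 = 0 := by decide
  have h2 : (PySem.Int.ofStr? (String.mk ['2'])).getD 0 = 2 := by decide
  have h4 : (PySem.Int.ofStr? (String.mk ['4'])).getD 0 = 4 := by decide
  have h6 : (PySem.Int.ofStr? (String.mk ['6'])).getD 0 = 6 := by decide
  have h8 : (PySem.Int.ofStr? (String.mk ['8'])).getD 0 = 8 := by decide
  unfold suitable_number_alt
  simp [PySem.Dict.getD_foldl_insert_add_one, List.foldl, h0, h2, h4, h6, h8]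

-- ===== VERDICT (by name: the statement is the Claim_ definition above) =====
theorem suitable_number_spec : Claim_equal_suitable_number := by
  intro i _
  show suitable_number i = suitable_number_alt i
  unfold suitable_number
  rw [pvFoldA, pvAltEval]
  simp only [Prod.mk.injEq]
  constructor <;> push_cast <;> ring
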